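-- pv_equiv track=rewrite | github.com/MuhammadShayanFaisal/AI-Smart-Study-Planner | csp.py | check_break_frequency
-- ===== SOURCE A (Python) =====
-- def check_break_frequency(schedule, max_continuous=2):
--     """Break must appear after every max_continuous study blocks."""
--     continuous = 0
--     for _, subject in schedule:
--         if subject == "Break":
--             continuous = 0
--         else:
--             continuous += 1
--             if continuous > max_continuous:
--                 return False
--     return True
-- ===== SOURCE B (Python) =====
-- def check_break_frequency(schedule, max_continuous=2):
--     """Break must appear after every max_continuous study blocks."""
--     # Run-segmentation: split the schedule into maximal consecutive runs keyed
--     # on whether the block is a Break, then test each non-break run's length.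
--     runs = []
--     i = 0
--     n = len(schedule)
--     while i < n:
--         _, subject = schedule[i]
--         key = (subject == "Break")
--         j = i + 1
--         while j < n:
--             _, s2 = schedule[j]
--             if (s2 == "Break") != key:
--                 break
--             j += 1
--         runs.append((key, j - i))
--         i = j
--     return all(key or length <= max_continuous for key, length in runs)
-- ===== Notes on version B (the rewrite author's own statement) =====
-- stated objective: alternative
-- what changed: Replaces A's running counter with reset-on-Break by a run-segmentation: the schedule is split into maximal consecutive Break/non-Break runs and each non-break run's length is tested against max_continuous.
import Mathlib
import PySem

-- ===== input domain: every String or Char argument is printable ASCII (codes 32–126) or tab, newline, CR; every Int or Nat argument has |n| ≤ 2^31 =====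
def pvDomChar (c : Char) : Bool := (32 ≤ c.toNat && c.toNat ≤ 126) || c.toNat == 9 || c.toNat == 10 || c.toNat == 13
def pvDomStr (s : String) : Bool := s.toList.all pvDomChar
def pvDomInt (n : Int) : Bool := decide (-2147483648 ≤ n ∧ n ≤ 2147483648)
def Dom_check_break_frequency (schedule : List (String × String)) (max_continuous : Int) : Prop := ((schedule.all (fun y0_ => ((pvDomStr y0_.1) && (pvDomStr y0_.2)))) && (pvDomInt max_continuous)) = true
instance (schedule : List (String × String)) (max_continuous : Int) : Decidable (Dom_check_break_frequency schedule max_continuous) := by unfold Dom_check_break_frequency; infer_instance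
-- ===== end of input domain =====

-- B replaces A's running counter by a run-segmentation (maximal Break/non-Break runs,
-- then a length test per non-break run); an alternative decomposition, not faster.

-- ===== PORT A =====
-- the for-loop with the 'continuous' counter, early 'return False' as short-circuit
def chkLoopA (max_continuous : Int) : List (String × String) → Int → Bool
  | [], _ => true
  | item :: t, continuous =>
    if item.2 == "Break" then chkLoopA max_continuous t 0
    else if continuous + 1 > max_continuous then false
    else chkLoopA max_continuous t (continuous + 1)

def check_break_frequency (schedule : List (String × String)) (max_continuous : Int) : Bool :=
  chkLoopA max_continuous schedule 0

-- ===== PORT B =====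
-- maximal consecutive runs, keyed on (subject == "Break"); (key, run length)
def groupRuns : List (String × String) → List (Bool × Nat)
  | [] => []
  | x :: xs =>
    let k := x.2 == "Break"
    let run := xs.takeWhile (fun y => (y.2 == "Break") == k)
    let rest := xs.dropWhile (fun y => (y.2 == "Break") == k)
    (k, 1 + run.length) :: groupRuns rest
termination_by l => l.length
decreasing_by
  simp only [List.length_cons]
  exact Nat.lt_succ_of_le (List.length_dropWhile_le _ _)

def check_break_frequency_alt (schedule : List (String × String)) (max_continuous : Int) : Bool :=
  (groupRuns schedule).all (fun p => p.1 || decide ((p.2 : Int) ≤ max_continuous))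

-- ===== PRECONDITION & SPEC =====
def Spec_check_break_frequency (schedule : List (String × String)) (max_continuous : Int) (out : Bool) : Prop := out = check_break_frequency_alt schedule max_continuous
instance (schedule : List (String × String)) (max_continuous : Int) (out : Bool) : Decidable (Spec_check_break_frequency schedule max_continuous out) := by unfold Spec_check_break_frequency; infer_instance

-- ===== CLAIM (what is proved, stated in full; the proofs are below) =====
def Claim_equal_check_break_frequency : Prop := ∀ (schedule : List (String × String)) (max_continuous : Int), Dom_check_break_frequency schedule max_continuous → Spec_check_break_frequency schedule max_continuous (check_break_frequency schedule max_continuous)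

-- ===== LEMMAS AND PROOFS =====

-- skipping a prefix of Break blocks from counter 0 leaves the loop at counter 0
theorem chkLoopA_break_prefix (m : Int) (pre rest : List (String × String))
    (h : ∀ y ∈ pre, y.2 == "Break") :
    chkLoopA m (pre ++ rest) 0 = chkLoopA m rest 0 := by
  induction pre with
  | nil => rfl
  | cons y t ih =>
    have hy : y.2 == "Break" := h y (List.mem_cons_self ..)
    simp only [List.cons_append, chkLoopA, hy, if_pos]
    exact ih (fun z hz => h z (List.mem_cons_of_mem _ hz))

-- a nonempty run of non-Break blocks advances the counter by its length, or fails iff it overflows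
theorem chkLoopA_study_run (m : Int) (run rest : List (String × String)) (c : Int)
    (hne : run ≠ []) (h : ∀ y ∈ run, ¬ (y.2 == "Break")) :
    chkLoopA m (run ++ rest) c =
      if c + (run.length : Int) > m then false else chkLoopA m rest (c + run.length) := by
  induction run generalizing c with
  | nil => exact absurd rfl hne
  | cons y t ih =>
    have hy : ¬ (y.2 == "Break") = true := h y (List.mem_cons_self ..)
    simp only [List.cons_append, chkLoopA, hy, if_neg, Bool.false_eq_true, not_false_iff]
    by_cases hc : c + 1 > m
    · have hgt : c + ((y :: t).length : Int) > m := by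
        simp only [List.length_cons]; push_cast; omega
      rw [if_pos hc, if_pos hgt]
    · rw [if_neg hc]
      cases t with
      | nil =>
        simp only [List.nil_append, List.length_cons, List.length_nil]
        have : ¬ (c + ((0 : Nat) + 1 : Nat) > m) := by push_cast; omega
        rw [if_neg this]
        norm_num
      | cons z t' =>
        rw [ih _ (List.cons_ne_nil _ _) (fun w hw => h w (List.mem_cons_of_mem _ hw))]
        have h1 : c + 1 + ((z :: t').length : Int) = c + ((y :: z :: t').length : Int) := by
          simp only [List.length_cons]; push_cast; ring
        rw [h1]

-- the counter is irrelevant when the tail starts with a Break (or is empty)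
theorem chkLoopA_reset (m : Int) (rest : List (String × String)) (c : Int)
    (h : rest = [] ∨ ∃ y t, rest = y :: t ∧ (y.2 == "Break") = true) :
    chkLoopA m rest c = chkLoopA m rest 0 := by
  rcases h with h | ⟨y, t, rfl, hy⟩
  · subst h; rfl
  · simp [chkLoopA, hy]

theorem main_equiv (m : Int) : ∀ (n : Nat) (l : List (String × String)), l.length ≤ n →
    chkLoopA m l 0 = check_break_frequency_alt l m := by
  intro n
  induction n with
  | zero =>
    intro l hl
    have : l = [] := List.eq_nil_of_length_eq_zero (Nat.le_zero.mp hl)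
    subst this; simp [chkLoopA, check_break_frequency_alt, groupRuns]
  | succ n ih =>
    intro l hl
    match l with
    | [] => simp [chkLoopA, check_break_frequency_alt, groupRuns]
    | x :: xs =>
      have hsplit := (List.takeWhile_append_dropWhile (p := fun y => (y.2 == "Break") == (x.2 == "Break")) (l := xs)).symm
      have hrest_le : (xs.dropWhile (fun y => (y.2 == "Break") == (x.2 == "Break"))).length ≤ n := by
        have := List.length_dropWhile_le (fun y => (y.2 == "Break") == (x.2 == "Break")) xs
        simp only [List.length_cons] at hl
        omega
      have hrest_shape : (xs.dropWhile (fun y => (y.2 == "Break") == (x.2 == "Break"))) = [] ∨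
          ∃ y t, (xs.dropWhile (fun y => (y.2 == "Break") == (x.2 == "Break"))) = y :: t ∧
            ((y.2 == "Break") == (x.2 == "Break")) = false := by
        cases hdw : xs.dropWhile (fun y => (y.2 == "Break") == (x.2 == "Break")) with
        | nil => exact Or.inl rfl
        | cons y t =>
          refine Or.inr ⟨y, t, rfl, ?_⟩
          have := List.head?_dropWhile_not (p := fun y => (y.2 == "Break") == (x.2 == "Break")) (l := xs)
          rw [hdw] at this
          simpa using this
      have htake : ∀ y ∈ xs.takeWhile (fun y => (y.2 == "Break") == (x.2 == "Break")),
          ((y.2 == "Break") == (x.2 == "Break")) = true :=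
        fun y hy => List.mem_takeWhile_imp (p := fun (y : String × String) => (y.2 == "Break") == (x.2 == "Break")) hy
      set run := xs.takeWhile (fun y => (y.2 == "Break") == (x.2 == "Break")) with hrun
      set rest := xs.dropWhile (fun y => (y.2 == "Break") == (x.2 == "Break")) with hrestdef
      have hBalt : check_break_frequency_alt (x :: xs) m =
          (((x.2 == "Break") || decide (1 + (run.length : Int) ≤ m)) &&
            check_break_frequency_alt rest m) := by
        unfold check_break_frequency_alt
        rw [groupRuns]
        simp only [List.all_cons]
        rw [← hrun, ← hrestdef]
        simp
      by_cases hx : (x.2 == "Break") = true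
      · -- Break-headed run: every element of run is a Break
        have hruns : ∀ y ∈ run, (y.2 == "Break") = true := by
          intro y hy
          have := htake y hy
          rw [hx] at this; simpa using this
        have hA : chkLoopA m (x :: xs) 0 = chkLoopA m rest 0 := by
          simp only [chkLoopA, hx, if_pos]
          rw [hsplit]
          exact chkLoopA_break_prefix m run rest hruns
        rw [hA, hBalt, hx, ih rest hrest_le]
        simp
      · -- study-headed run: every element of run is non-Break
        have hruns : ∀ y ∈ (x :: run), ¬ (y.2 == "Break") = true := by
          intro y hy
          rcases List.mem_cons.mp hy with rfl | hy'
          · exact hx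
          · have := htake y hy'
            intro hb
            rw [hb] at this
            simp only [eq_comm] at this
            exact hx (by simpa using this.symm)
        have hA : chkLoopA m (x :: xs) 0 =
            (if (0 : Int) + ((x :: run).length : Int) > m then false
             else chkLoopA m rest (0 + (x :: run).length)) := by
          have : x :: xs = (x :: run) ++ rest := by rw [List.cons_append, ← hsplit]
          rw [this]
          exact chkLoopA_study_run m (x :: run) rest 0 (List.cons_ne_nil _ _) hruns
        have hxb : (x.2 == "Break") = false := by
          cases h' : (x.2 == "Break") with
          | true => exact absurd h' hx
          | false => rfl
        have hreset : chkLoopA m rest ((0 : Int) + (x :: run).length) = chkLoopA m rest 0 := by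
          apply chkLoopA_reset
          rcases hrest_shape with h | ⟨y, t, heq, hy⟩
          · exact Or.inl h
          · refine Or.inr ⟨y, t, heq, ?_⟩
            cases hyb : (y.2 == "Break") with
            | true => rfl
            | false => rw [hyb, hxb] at hy; simp at hy
        rw [hA, hreset, hBalt, ih rest hrest_le]
        cases hcmp : decide (1 + ((run.length : Int)) ≤ m) with
        | true =>
          have hle : 1 + (run.length : Int) ≤ m := of_decide_eq_true hcmp
          have hno : ¬ ((0 : Int) + ((x :: run).length : Int) > m) := by
            simp only [List.length_cons]; push_cast; omega
          rw [if_neg hno, hxb]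
          simp
        | false =>
          have hgt : ¬ (1 + (run.length : Int) ≤ m) := of_decide_eq_false hcmp
          have hyes : (0 : Int) + ((x :: run).length : Int) > m := by
            simp only [List.length_cons]; push_cast; omega
          rw [if_pos hyes, hxb]
          simp

-- ===== VERDICT (by name: the statement is the Claim_ definition above) =====
theorem check_break_frequency_spec : Claim_equal_check_break_frequency := by
  intro schedule max_continuous _
  unfold Spec_check_break_frequency check_break_frequency
  exact main_equiv max_continuous schedule.length schedule le_rfl
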